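-- pv_equiv track=rewrite | github.com/Edimilton/Projeto-e-Analise-de-Algoritmos | Algoritmos Ordenacao/Q2.py | removeHeap
-- ===== SOURCE A (Python) =====
-- def esquerda(pos):
--   return (2 * pos) + 1
--
-- def direita(pos):
--   return 2 * (pos + 1)
--
-- def pai(pos):
--   return int((pos - 1)/ 2)
--
-- def borbulhar(vetor, pos):
--   p = pai(pos)
--   while pos > 0 and vetor[pos] > vetor[p]:
--     vetor[pos], vetor[p] = vetor[p], vetor[pos]
--     pos = p
--     p = pai(pos)
--
-- def gotejar(vetor, tamanho, pos):
--   while pos >= 0: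
--     controle = -1
--     dir = direita(pos)
--     esq = esquerda(pos)
--
--     if dir < tamanho and vetor[dir] > vetor[pos]:
--       if vetor[esq] > vetor[dir]:
--         controle = esq
--       else:
--         controle = dir
--
--     else:
--       if esq < tamanho and vetor[esq] > vetor[pos]:
--         controle = esq
--
--     if controle >= 0 :
--       vetor[controle],vetor[pos] = vetor[pos], vetor[controle]
--     pos = controle
--
--   return vetor
--
-- def removeHeap(heap, tamanho, x):
--   for i in range(tamanho):
--     if x == heap[i]:
--       pos = i
--       break
--
--   heap[pos] = heap[tamanho -1]
--
--   borbulhar(heap, pos)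
--   gotejar(heap, tamanho , pos)
--
--   return heap[:-1]
-- ===== SOURCE B (Python) =====
-- # Same removal-from-"heap" routine, rewritten as recursive helpers: find via
-- # list.index on the slice, recursive bubble-up and recursive sift-down with
-- # exactly the same child-selection rule (bound = tamanho, as in the original).
-- # Like the original, it mutates `heap` in place; the proven equivalence is
-- # about the return value (side effects on `heap` are the same assignments).
--
-- def removeHeap(heap, tamanho, x):
--     pos = heap[:tamanho].index(x)
--     heap[pos] = heap[tamanho - 1]
--     _bubble_up(heap, pos)
--     _sift_down(heap, tamanho, pos)
--     return heap[:-1]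
--
-- def _bubble_up(v, pos):
--     if pos > 0:
--         p = (pos - 1) // 2
--         if v[pos] > v[p]:
--             v[pos], v[p] = v[p], v[pos]
--             _bubble_up(v, p)
--
-- def _sift_down(v, n, pos):
--     l = 2 * pos + 1
--     r = l + 1
--     if r < n and v[r] > v[pos]:
--         c = l if v[l] > v[r] else r
--     elif l < n and v[l] > v[pos]:
--         c = l
--     else:
--         return
--     v[c], v[pos] = v[pos], v[c]
--     _sift_down(v, n, c)
-- ===== Notes on version B (the rewrite author's own statement) =====
-- stated objective: alternative
-- what changed: The linear scan becomes a slice+list.index find, and the two sentinel-driven while loops (bubble-up and the controle-based sift-down) become recursive helpers with early return, keeping the original's exact child-selection rule and tamanho bound.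
import Mathlib
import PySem

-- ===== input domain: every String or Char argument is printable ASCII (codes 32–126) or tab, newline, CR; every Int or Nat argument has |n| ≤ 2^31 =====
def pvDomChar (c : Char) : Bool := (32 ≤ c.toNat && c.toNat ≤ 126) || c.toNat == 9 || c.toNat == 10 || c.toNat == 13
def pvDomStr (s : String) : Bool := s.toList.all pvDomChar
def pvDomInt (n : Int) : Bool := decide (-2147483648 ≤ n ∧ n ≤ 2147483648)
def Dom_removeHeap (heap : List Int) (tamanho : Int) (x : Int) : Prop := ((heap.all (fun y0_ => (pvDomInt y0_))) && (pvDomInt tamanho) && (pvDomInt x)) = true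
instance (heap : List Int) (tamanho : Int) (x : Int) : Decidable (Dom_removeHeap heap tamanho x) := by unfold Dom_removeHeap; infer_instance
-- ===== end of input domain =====

-- B replaces A's three while-loops by a slice+index find, a recursive bubble-up and a
-- recursive sift-down with the same child-selection rule (alternative decomposition, same cost).
-- Both Pythons mutate `heap` in place identically; the theorems are about the return value.


-- ===== PORT A =====
-- 'for i in range(tamanho): if x == heap[i]: pos = i; break' — first index i < tamanho with heap[i] == x
def findPosA (heap : List Int) (x : Int) : Nat → Nat → Option Nat
  | 0, _ => none
  | k+1, i =>
    if x = PySem.List.pyGetD heap (i : Int) 0 then some i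
    else findPosA heap x k (i+1)

-- borbulhar: bubble-up while loop; pai(pos) = int((pos-1)/2) = (pos-1)/2 for the pos > 0 it is used on
def borbulharA (vetor : List Int) (pos : Nat) : List Int :=
  if h : 0 < pos ∧ PySem.List.pyGetD vetor (pos : Int) 0 > PySem.List.pyGetD vetor (((pos-1)/2 : Nat) : Int) 0 then
    borbulharA
      (PySem.List.pySetD
        (PySem.List.pySetD vetor (pos : Int) (PySem.List.pyGetD vetor (((pos-1)/2 : Nat) : Int) 0))
        (((pos-1)/2 : Nat) : Int) (PySem.List.pyGetD vetor (pos : Int) 0))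
      ((pos-1)/2)
  else vetor
termination_by pos
decreasing_by omega

-- gotejar: sift-down while loop with the controle sentinel; fuel only makes the loop total
-- (inside Pre_ the loop runs at most tamanho+2 iterations, so the fuel is never exhausted)
def gotejarA : Nat → List Int → Int → Int → List Int
  | 0, v, _, _ => v
  | fuel+1, v, n, pos =>
    if pos ≥ 0 then
      let dir := 2 * (pos + 1)
      let esq := 2 * pos + 1
      let controle : Int :=
        if dir < n ∧ PySem.List.pyGetD v dir 0 > PySem.List.pyGetD v pos 0 then
          (if PySem.List.pyGetD v esq 0 > PySem.List.pyGetD v dir 0 then esq else dir)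
        else if esq < n ∧ PySem.List.pyGetD v esq 0 > PySem.List.pyGetD v pos 0 then esq
        else -1
      let v' := if controle ≥ 0 then
          PySem.List.pySetD (PySem.List.pySetD v controle (PySem.List.pyGetD v pos 0)) pos (PySem.List.pyGetD v controle 0)
        else v
      gotejarA fuel v' n controle
    else v

def removeHeap (heap : List Int) (tamanho : Int) (x : Int) : List Int :=
  match findPosA heap x tamanho.toNat 0 with
  | none => []   -- x not found: the Python raises NameError (unbound pos); excluded by Pre_
  | some pos =>
    let h1 := PySem.List.pySetD heap (pos : Int) (PySem.List.pyGetD heap (tamanho - 1) 0)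
    let h2 := borbulharA h1 pos
    let h3 := gotejarA (tamanho.toNat + 2) h2 tamanho (pos : Int)
    PySem.List.slice h3 none (some (-1))

-- ===== PORT B =====
def bubbleUpB (v : List Int) (pos : Nat) : List Int :=
  if h : 0 < pos then
    let p := (pos - 1) / 2
    if PySem.List.pyGetD v (pos : Int) 0 > PySem.List.pyGetD v (p : Int) 0 then
      bubbleUpB
        (PySem.List.pySetD
          (PySem.List.pySetD v (pos : Int) (PySem.List.pyGetD v (p : Int) 0))
          (p : Int) (PySem.List.pyGetD v (pos : Int) 0))
        p
    else v
  else v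
termination_by pos
decreasing_by omega

-- recursive sift-down; fuel only makes the recursion total (never exhausted inside Pre_)
def siftDownB : Nat → List Int → Int → Int → List Int
  | 0, v, _, _ => v
  | fuel+1, v, n, pos =>
    let l := 2 * pos + 1
    let r := l + 1
    let c? : Option Int :=
      if r < n ∧ PySem.List.pyGetD v r 0 > PySem.List.pyGetD v pos 0 then
        some (if PySem.List.pyGetD v l 0 > PySem.List.pyGetD v r 0 then l else r)
      else if l < n ∧ PySem.List.pyGetD v l 0 > PySem.List.pyGetD v pos 0 then some l
      else none
    match c? with
    | none => v
    | some c =>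
      siftDownB fuel (PySem.List.pySetD (PySem.List.pySetD v c (PySem.List.pyGetD v pos 0)) pos (PySem.List.pyGetD v c 0)) n c

def removeHeap_alt (heap : List Int) (tamanho : Int) (x : Int) : List Int :=
  match PySem.List.index? (PySem.List.slice heap none (some tamanho)) x with
  | none => []   -- x not found: the Python raises ValueError; excluded by Pre_
  | some pos =>
    let h1 := PySem.List.pySetD heap (pos : Int) (PySem.List.pyGetD heap (tamanho - 1) 0)
    let h2 := bubbleUpB h1 pos
    let h3 := siftDownB (tamanho.toNat + 2) h2 tamanho (pos : Int)
    PySem.List.slice h3 none (some (-1))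

-- ===== PRECONDITION & SPEC =====
-- Exactly where the Python A returns normally: otherwise the find loop raises NameError
-- (x absent from heap[:tamanho]) or heap[i] / heap[tamanho-1] raises IndexError (tamanho > len(heap)).
def Pre_removeHeap (heap : List Int) (tamanho : Int) (x : Int) : Prop :=
  tamanho ≤ (heap.length : Int) ∧ x ∈ heap.take tamanho.toNat
instance (heap : List Int) (tamanho : Int) (x : Int) : Decidable (Pre_removeHeap heap tamanho x) := by unfold Pre_removeHeap; infer_instance

def pvWitness_removeHeap : List Int × Int × Int := ([3, 1, 2], 3, 1)

def Spec_removeHeap (heap : List Int) (tamanho : Int) (x : Int) (out : List Int) : Prop := out = removeHeap_alt heap tamanho x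
instance (heap : List Int) (tamanho : Int) (x : Int) (out : List Int) : Decidable (Spec_removeHeap heap tamanho x out) := by unfold Spec_removeHeap; infer_instance

-- ===== CLAIM (what is proved, stated in full; the proofs are below) =====
def Claim_equal_removeHeap : Prop := ∀ (heap : List Int) (tamanho : Int) (x : Int), Dom_removeHeap heap tamanho x → Pre_removeHeap heap tamanho x → Spec_removeHeap heap tamanho x (removeHeap heap tamanho x)

-- ===== LEMMAS AND PROOFS =====

theorem findPosA_eq_index? (heap : List Int) (x : Int) :
    ∀ (k i : Nat), i + k ≤ heap.length →
      findPosA heap x k i = (PySem.List.index? ((heap.drop i).take k) x).map (· + i) := by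
  intro k
  induction k with
  | zero => intro i _; simp [findPosA]
  | succ k ih =>
    intro i hik
    have hi : i < heap.length := by omega
    rw [List.drop_eq_getElem_cons hi]
    rw [findPosA]
    rw [PySem.List.pyGetD_natCast, List.getD_eq_getElem?_getD, List.getElem?_eq_getElem hi]
    simp only [Option.getD_some, List.take_succ_cons]
    by_cases hx : x = heap[i]
    · subst hx
      rw [if_pos rfl, PySem.List.index?_cons_self]
      simp
    · rw [if_neg hx, PySem.List.index?_cons_of_ne _ (Ne.symm hx)]
      rw [ih (i+1) (by omega)]
      simp only [Option.map_map]
      congr 1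
      funext v
      simp; omega

theorem borbulharA_eq_bubbleUpB : ∀ (pos : Nat) (v : List Int), borbulharA v pos = bubbleUpB v pos := by
  intro pos
  induction pos using Nat.strong_induction_on with
  | _ pos ih =>
    intro v
    rw [borbulharA, bubbleUpB]
    by_cases h0 : 0 < pos
    · by_cases hc : PySem.List.pyGetD v (pos : Int) 0 > PySem.List.pyGetD v (((pos-1)/2 : Nat) : Int) 0
      · have hAnd : 0 < pos ∧ PySem.List.pyGetD v (pos : Int) 0 > PySem.List.pyGetD v (((pos-1)/2 : Nat) : Int) 0 := ⟨h0, hc⟩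
        rw [dif_pos hAnd, dif_pos h0]
        simp only [if_pos hc]
        exact ih ((pos-1)/2) (by omega) _
      · rw [dif_neg (fun h => hc h.2), dif_pos h0]
        simp only [if_neg hc]
    · rw [dif_neg (fun h => h0 h.1), dif_neg h0]

theorem gotejarA_neg (fuel : Nat) (v : List Int) (n pos : Int) (h : pos < 0) :
    gotejarA fuel v n pos = v := by
  cases fuel with
  | zero => rfl
  | succ fuel => rw [gotejarA, if_neg (by omega)]

theorem gotejarA_eq_siftDownB : ∀ (fuel : Nat) (v : List Int) (n pos : Int), 0 ≤ pos →
    gotejarA fuel v n pos = siftDownB fuel v n pos := by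
  intro fuel
  induction fuel with
  | zero => intro v n pos _; rfl
  | succ fuel ih =>
    intro v n pos hpos
    rw [gotejarA, siftDownB, if_pos (by omega)]
    have hrd : 2 * pos + 1 + 1 = 2 * (pos + 1) := by ring
    simp only [hrd]
    by_cases h1 : 2 * (pos + 1) < n ∧ PySem.List.pyGetD v (2 * (pos + 1)) 0 > PySem.List.pyGetD v pos 0
    · simp only [if_pos h1]
      by_cases h2 : PySem.List.pyGetD v (2 * pos + 1) 0 > PySem.List.pyGetD v (2 * (pos + 1)) 0
      · simp only [if_pos h2, if_pos (show (0:Int) ≤ 2 * pos + 1 by omega)]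
        exact ih _ n _ (by omega)
      · simp only [if_neg h2, if_pos (show (0:Int) ≤ 2 * (pos + 1) by omega)]
        exact ih _ n _ (by omega)
    · simp only [if_neg h1]
      by_cases h2 : 2 * pos + 1 < n ∧ PySem.List.pyGetD v (2 * pos + 1) 0 > PySem.List.pyGetD v pos 0
      · simp only [if_pos h2, if_pos (show (0:Int) ≤ 2 * pos + 1 by omega)]
        exact ih _ n _ (by omega)
      · simp only [if_neg h2, if_neg (show ¬ (0:Int) ≤ -1 by omega)]
        exact gotejarA_neg fuel v n (-1) (by omega)

-- ===== VERDICT (by name: the statement is the Claim_ definition above) =====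
theorem removeHeap_spec : Claim_equal_removeHeap := by
  intro heap tamanho x _ hpre
  obtain ⟨hlen, hmem⟩ := hpre
  have ht1 : 1 ≤ tamanho := by
    by_contra h
    have : tamanho.toNat = 0 := by omega
    simp [this] at hmem
  unfold Spec_removeHeap removeHeap removeHeap_alt
  rw [PySem.List.slice_to heap (by omega)]
  rw [findPosA_eq_index? heap x tamanho.toNat 0 (by omega)]
  rw [List.drop_zero]
  cases hidx : PySem.List.index? (heap.take tamanho.toNat) x with
  | none => simp
  | some pos =>
    simp only [Option.map_some, add_zero]
    rw [borbulharA_eq_bubbleUpB, gotejarA_eq_siftDownB _ _ _ _ (by positivity)]
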